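-- pv_equiv track=rewrite | github.com/morenoadan22/bioinfo | spliced_motif.py | find_motif_indices
-- ===== SOURCE A (Python) =====
-- def find_motif_indices(s, t):
--     indices = []
--     index = 0
--     new_s = s[index:]
--     for c in t:
--         new_s = s[index:]
--         index = new_s.index(c) + 1 + index
--         indices.append(index)
--     return indices
-- ===== SOURCE B (Python) =====
-- def find_motif_indices(s, t):
--     # Inverted index: for each character, the ascending list of its positions
--     # in s; then one pass over t picks, via a forward-moving cursor per
--     # character, the first unused position >= the previous match.
--     pos = {}
--     for i, c in enumerate(s):
--         pos.setdefault(c, []).append(i)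
--     cur = {}
--     indices = []
--     prev = 0
--     for c in t:
--         lst = pos.get(c, [])
--         k = cur.get(c, 0)
--         while k < len(lst) and lst[k] < prev:
--             k += 1
--         if k == len(lst):
--             raise ValueError("substring not found")
--         indices.append(lst[k] + 1)
--         cur[c] = k + 1
--         prev = lst[k] + 1
--     return indices
-- ===== Notes on version B (the rewrite author's own statement) =====
-- stated objective: faster
-- what changed: Replaces A's per-motif-character suffix slicing (s[index:] copies) and .index rescans by a precomputed inverted index (char -> ascending position list built in one pass over s) consumed with forward-moving per-character cursors, one pass over t.
import Mathlib
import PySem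

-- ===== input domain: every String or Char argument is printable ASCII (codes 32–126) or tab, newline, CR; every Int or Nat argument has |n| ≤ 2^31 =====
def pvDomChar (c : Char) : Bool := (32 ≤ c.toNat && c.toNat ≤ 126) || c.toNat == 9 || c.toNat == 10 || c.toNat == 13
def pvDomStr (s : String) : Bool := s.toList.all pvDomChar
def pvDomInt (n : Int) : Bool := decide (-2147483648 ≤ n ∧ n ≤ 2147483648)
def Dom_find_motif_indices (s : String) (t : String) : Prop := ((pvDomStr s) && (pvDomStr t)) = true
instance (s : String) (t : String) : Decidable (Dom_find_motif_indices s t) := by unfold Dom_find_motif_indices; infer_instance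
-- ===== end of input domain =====

-- B replaces A's per-motif-character suffix slicing + .index rescans by a precomputed
-- inverted index (char -> ascending position list) consumed with forward cursors (faster).

-- ===== PORT A =====
-- for c in t: new_s = s[index:]; index = new_s.index(c) + 1 + index; indices.append(index)
-- (on a missing character Python raises ValueError: index? returns none there; Pre_ excludes it)
def find_motif_indices (s : String) (t : String) : List Int :=
  (t.toList.foldl
    (fun (st : List Int × Int) c =>
      match PySem.List.index? (PySem.List.slice s.toList (some st.2) none) c with
      | some k => (st.1 ++ [st.2 + (k : Int) + 1], st.2 + (k : Int) + 1)
      | none => st)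
    ([], 0)).1

-- ===== PORT B =====
-- pos = {}; for i, c in enumerate(s): pos.setdefault(c, []).append(i)
-- (setdefault-then-append is exactly Dict.modify c [] (· ++ [i]))
def pvPosBuild (sl : List Char) : PySem.Dict Char (List Int) :=
  (PySem.List.enumerate sl 0).foldl
    (fun d ic => d.modify ic.2 [] (· ++ [ic.1])) PySem.Dict.empty

-- while k < len(lst) and lst[k] < prev: k += 1
-- (lst[k]? = some v iff k < len(lst), so the match is exactly Python's condition)
def pvSkip (lst : List Int) (prev : Int) (k : Nat) : Nat :=
  if h : k < lst.length then
    if lst[k] < prev then pvSkip lst prev (k + 1) else k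
  else k
termination_by lst.length - k

-- for c in t: lst = pos.get(c, []); k = cur.get(c, 0); (skip); if k == len(lst): raise
-- ValueError; indices.append(lst[k]+1); cur[c] = k+1; prev = lst[k]+1
-- (the raise happens exactly when lst[k]? = none — the cursor never exceeds len(lst) —
-- and only outside Pre_; the port leaves the state unchanged there)
def find_motif_indices_alt (s : String) (t : String) : List Int :=
  let pos := pvPosBuild s.toList
  (t.toList.foldl
    (fun (st : List Int × PySem.Dict Char Nat × Int) c =>
      let lst := pos.getD c []
      let k := pvSkip lst st.2.2 (st.2.1.getD c 0)
      match lst[k]? with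
      | some x => (st.1 ++ [x + 1], st.2.1.insert c (k + 1), x + 1)
      | none => st)
    ([], PySem.Dict.empty, 0)).1

-- ===== PRECONDITION & SPEC =====
-- Pre_ excludes exactly the inputs where both Pythons raise ValueError: t not a subsequence of s.
def Pre_find_motif_indices (s : String) (t : String) : Prop := t.toList.Sublist s.toList
instance (s : String) (t : String) : Decidable (Pre_find_motif_indices s t) := by
  unfold Pre_find_motif_indices; infer_instance
def pvWitness_find_motif_indices : String × String := ("abcab", "ba")
def Spec_find_motif_indices (s : String) (t : String) (out : List Int) : Prop := out = find_motif_indices_alt s t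
instance (s : String) (t : String) (out : List Int) : Decidable (Spec_find_motif_indices s t out) := by unfold Spec_find_motif_indices; infer_instance

-- ===== CLAIM (what is proved, stated in full; the proofs are below) =====
def Claim_equal_find_motif_indices : Prop := ∀ (s : String) (t : String), Dom_find_motif_indices s t → Pre_find_motif_indices s t → Spec_find_motif_indices s t (find_motif_indices s t)

-- ===== LEMMAS AND PROOFS =====

-- the common greedy leftmost matching, by simultaneous recursion on the suffix of s and the rest of t
def pvGreedy : List Char → List Char → Nat → List Int
  | _, [], _ => []
  | [], _ :: _, _ => []
  | x :: xs, c :: cs, i =>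
    if x = c then ((i : Int) + 1) :: pvGreedy xs cs (i + 1)
    else pvGreedy xs (c :: cs) (i + 1)

lemma pvGreedy_nil_t (chars : List Char) (i : Nat) : pvGreedy chars [] i = [] := by
  cases chars <;> simp [pvGreedy]

lemma pvSublist_drop {c : Char} {cs chars : List Char} {k : Nat}
    (h : List.Sublist (c :: cs) chars) (hk : PySem.List.index? chars c = some k) :
    List.Sublist cs (chars.drop (k + 1)) := by
  induction chars generalizing k with
  | nil => cases h
  | cons x xs ih =>
    by_cases hx : x = c
    · subst hx
      rw [PySem.List.index?_cons_self] at hk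
      cases hk
      simpa using List.cons_sublist_cons.mp h
    · rw [PySem.List.index?_cons_of_ne _ hx] at hk
      cases hk' : PySem.List.index? xs c with
      | none => rw [hk'] at hk; simp at hk
      | some k' =>
        rw [hk'] at hk
        simp at hk
        subst hk
        have h' : List.Sublist (c :: cs) xs := by
          cases h with
          | cons _ h => exact h
          | cons₂ _ h => exact absurd rfl hx
        simpa using ih h' hk'

lemma pvGreedy_index {chars : List Char} {c : Char} (cs : List Char) {k : Nat} (i : Nat)
    (hk : PySem.List.index? chars c = some k) :
    pvGreedy chars (c :: cs) i = ((i + k + 1 : Nat) : Int) :: pvGreedy (chars.drop (k + 1)) cs (i + k + 1) := by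
  induction chars generalizing i k with
  | nil => simp [PySem.List.index?] at hk
  | cons x xs ih =>
    by_cases hx : x = c
    · subst hx
      rw [PySem.List.index?_cons_self] at hk
      cases hk
      simp [pvGreedy]
    · rw [PySem.List.index?_cons_of_ne _ hx] at hk
      cases hk' : PySem.List.index? xs c with
      | none => rw [hk'] at hk; simp at hk
      | some k' =>
        rw [hk'] at hk
        simp at hk
        subst hk
        have := ih (i + 1) hk'
        simp only [pvGreedy, if_neg hx, this, List.drop_succ_cons]
        rw [show i + 1 + k' + 1 = i + (k' + 1) + 1 by omega]

-- A's fold over t, relative to an offset i into s, computes pvGreedy on the suffix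
lemma pvAfold (sl : List Char) : ∀ (ts : List Char) (i : Nat) (acc : List Int),
    List.Sublist ts (sl.drop i) →
    ((ts.foldl
      (fun (st : List Int × Int) c =>
        match PySem.List.index? (PySem.List.slice sl (some st.2) none) c with
        | some k => (st.1 ++ [st.2 + (k : Int) + 1], st.2 + (k : Int) + 1)
        | none => st)
      (acc, (i : Int))).1) = acc ++ pvGreedy (sl.drop i) ts i := by
  intro ts
  induction ts with
  | nil => intro i acc _; simp [pvGreedy_nil_t]
  | cons c cs ih =>
    intro i acc h
    have hc : c ∈ sl.drop i := h.subset (List.mem_cons_self)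
    obtain ⟨k, hk⟩ : ∃ k, PySem.List.index? (sl.drop i) c = some k := by
      have := (PySem.List.index?_isSome_iff (xs := sl.drop i) (v := c)).mpr hc
      exact Option.isSome_iff_exists.mp this
    have hslice : PySem.List.slice sl (some ((i : Nat) : Int)) none = sl.drop i :=
      PySem.List.slice_from_natCast sl i
    have hcast : (i : Int) + (k : Int) + 1 = ((i + k + 1 : Nat) : Int) := by push_cast; ring
    have hsub : List.Sublist cs (sl.drop (i + k + 1)) := by
      have h2 := pvSublist_drop h hk
      rwa [List.drop_drop, ← Nat.add_assoc] at h2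
    simp only [List.foldl_cons, hslice, hk, hcast]
    rw [ih (i + k + 1) (acc ++ [((i + k + 1 : Nat) : Int)]) hsub]
    rw [pvGreedy_index cs i hk]
    simp [← Nat.add_assoc]

-- the ascending occurrence positions of c in sl, offset n (what pos[c] holds)
def pvOcc : List Char → Nat → Char → List Int
  | [], _, _ => []
  | x :: xs, n, c => if x = c then ((n : Int)) :: pvOcc xs (n + 1) c else pvOcc xs (n + 1) c

-- pvPosBuild's fold accumulates pvOcc per key
lemma pvBuild_getD (c : Char) : ∀ (sl : List Char) (n : Nat) (d : PySem.Dict Char (List Int)),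
    (((PySem.List.enumerate sl ((n : Nat) : Int)).foldl
      (fun d ic => d.modify ic.2 [] (· ++ [ic.1])) d).getD c []) = d.getD c [] ++ pvOcc sl n c := by
  intro sl
  induction sl with
  | nil => intro n d; simp [PySem.List.enumerate_nil, pvOcc]
  | cons x xs ih =>
    intro n d
    have hcast : ((n : Nat) : Int) + 1 = ((n + 1 : Nat) : Int) := by push_cast; ring
    rw [PySem.List.enumerate_cons, List.foldl_cons]
    dsimp only
    rw [hcast, ih (n + 1)]
    by_cases hx : x = c
    · subst hx
      rw [PySem.Dict.getD_modify_self]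
      simp [pvOcc]
    · have hcx : c ≠ x := fun heq => hx heq.symm
      rw [PySem.Dict.getD_modify_of_ne d _ _ hcx]
      simp [pvOcc, hx]

lemma pvPosBuild_getD (sl : List Char) (c : Char) :
    (pvPosBuild sl).getD c [] = pvOcc sl 0 c := by
  have := pvBuild_getD c sl 0 PySem.Dict.empty
  simpa [pvPosBuild, PySem.Dict.getD_empty] using this

-- splitting occurrences at an offset
lemma pvOcc_append (c : Char) : ∀ (l₁ l₂ : List Char) (n : Nat),
    pvOcc (l₁ ++ l₂) n c = pvOcc l₁ n c ++ pvOcc l₂ (n + l₁.length) c := by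
  intro l₁
  induction l₁ with
  | nil => intro l₂ n; simp [pvOcc]
  | cons x xs ih =>
    intro l₂ n
    simp only [List.cons_append, pvOcc, ih]
    split_ifs <;> simp <;> ring_nf

-- every occurrence position lies in [n, n + len)
lemma pvOcc_bounds (c : Char) : ∀ (l : List Char) (n : Nat) (j : Nat) (v : Int),
    (pvOcc l n c)[j]? = some v → (n : Int) ≤ v ∧ v < (n : Int) + l.length := by
  intro l
  induction l with
  | nil => intro n j v h; simp [pvOcc] at h
  | cons x xs ih =>
    intro n j v h
    simp only [pvOcc] at h
    by_cases hx : x = c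
    · rw [if_pos hx] at h
      cases j with
      | zero =>
        simp only [List.getElem?_cons_zero, Option.some.injEq] at h
        subst h
        refine ⟨le_refl _, ?_⟩
        simp only [List.length_cons]
        push_cast
        omega
      | succ j' =>
        simp only [List.getElem?_cons_succ] at h
        have := ih (n + 1) j' v h
        push_cast at this ⊢
        constructor <;> [omega; (simp; omega)]
    · rw [if_neg hx] at h
      have := ih (n + 1) j v h
      push_cast at this ⊢
      constructor <;> [omega; (simp; omega)]

-- head of the occurrences = first index
lemma pvOcc_head (c : Char) : ∀ (l : List Char) (n : Nat),
    (PySem.List.index? l c = none → pvOcc l n c = []) ∧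
    (∀ m, PySem.List.index? l c = some m → ∃ rest, pvOcc l n c = ((n + m : Nat) : Int) :: rest) := by
  intro l
  induction l with
  | nil =>
    intro n
    refine ⟨fun _ => by simp [pvOcc], fun m h => ?_⟩
    simp [PySem.List.index?] at h
  | cons x xs ih =>
    intro n
    by_cases hx : x = c
    · subst hx
      refine ⟨fun h => ?_, fun m h => ?_⟩
      · rw [PySem.List.index?_cons_self] at h; cases h
      · rw [PySem.List.index?_cons_self] at h
        cases h
        exact ⟨pvOcc xs (n + 1) x, by simp [pvOcc]⟩
    · refine ⟨fun h => ?_, fun m h => ?_⟩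
      · rw [PySem.List.index?_cons_of_ne _ hx] at h
        cases hk : PySem.List.index? xs c with
        | none => simp [pvOcc, hx]; exact (ih (n + 1)).1 hk
        | some k => rw [hk] at h; simp at h
      · rw [PySem.List.index?_cons_of_ne _ hx] at h
        cases hk : PySem.List.index? xs c with
        | none => rw [hk] at h; simp at h
        | some k =>
          rw [hk] at h
          simp at h
          subst h
          obtain ⟨rest, hr⟩ := (ih (n + 1)).2 k hk
          refine ⟨rest, ?_⟩
          simp only [pvOcc, if_neg hx, hr]
          congr 2
          omega

-- stop point: prefix all < prev, and at k either past the end or ≥ prev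
def pvStop (lst : List Int) (prev : Int) (k : Nat) : Prop :=
  (∀ j < k, ∃ v, lst[j]? = some v ∧ v < prev) ∧
  (lst[k]? = none ∨ ∃ v, lst[k]? = some v ∧ prev ≤ v)

lemma pvStop_unique {lst : List Int} {prev : Int} {k₁ k₂ : Nat}
    (h₁ : pvStop lst prev k₁) (h₂ : pvStop lst prev k₂) : k₁ = k₂ := by
  by_contra hne
  rcases Nat.lt_or_ge k₁ k₂ with h | h
  · obtain ⟨v, hv, hvp⟩ := h₂.1 k₁ h
    rcases h₁.2 with h' | ⟨w, hw, hwp⟩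
    · rw [h'] at hv; cases hv
    · rw [hw] at hv; cases hv; omega
  · rcases Nat.lt_or_ge k₂ k₁ with h' | h'
    · obtain ⟨v, hv, hvp⟩ := h₁.1 k₂ h'
      rcases h₂.2 with h'' | ⟨w, hw, hwp⟩
      · rw [h''] at hv; cases hv
      · rw [hw] at hv; cases hv; omega
    · omega

lemma pvSkip_stop (lst : List Int) (prev : Int) : ∀ (k₀ : Nat),
    (∀ j < k₀, ∃ v, lst[j]? = some v ∧ v < prev) → pvStop lst prev (pvSkip lst prev k₀) := by
  intro k₀
  induction hn : lst.length - k₀ using Nat.strong_induction_on generalizing k₀ with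
  | _ n ih =>
    intro h₀
    rw [pvSkip]
    by_cases hlen : k₀ < lst.length
    · rw [dif_pos hlen]
      by_cases hv : lst[k₀] < prev
      · rw [if_pos hv]
        refine ih (lst.length - (k₀ + 1)) (by omega) (k₀ + 1) rfl ?_
        intro j hj
        rcases Nat.lt_or_ge j k₀ with h | h
        · exact h₀ j h
        · have hje : j = k₀ := by omega
          refine ⟨lst[j]'(by omega), List.getElem?_eq_getElem (by omega), ?_⟩
          simp only [hje]
          exact hv
      · rw [if_neg hv]
        exact ⟨h₀, Or.inr ⟨lst[k₀], List.getElem?_eq_getElem hlen, by omega⟩⟩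
    · rw [dif_neg hlen]
      exact ⟨h₀, Or.inl (List.getElem?_eq_none_iff.mpr (by omega))⟩

-- the stop point of the full occurrence list from a greedy offset p: it carries p + index?
lemma pvOcc_stop (sl : List Char) (c : Char) (p : Nat) {m : Nat}
    (hm : PySem.List.index? (sl.drop p) c = some m) :
    ∃ k, pvStop (pvOcc sl 0 c) ((p : Nat) : Int) k ∧
      (pvOcc sl 0 c)[k]? = some ((p + m : Nat) : Int) := by
  have hp : p ≤ sl.length := by
    by_contra hgt
    have hnil : sl.drop p = [] := List.drop_eq_nil_of_le (by omega)
    rw [hnil] at hm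
    simp [PySem.List.index?] at hm
  have htk : (sl.take p).length = p := by simp [Nat.min_eq_left hp]
  have hsplit : pvOcc sl 0 c = pvOcc (sl.take p) 0 c ++ pvOcc (sl.drop p) p c := by
    have := pvOcc_append c (sl.take p) (sl.drop p) 0
    rw [List.take_append_drop] at this
    rw [this, Nat.zero_add, htk]
  obtain ⟨rest, hr⟩ := (pvOcc_head c (sl.drop p) p).2 m hm
  have hat : (pvOcc sl 0 c)[(pvOcc (sl.take p) 0 c).length]? = some ((p + m : Nat) : Int) := by
    rw [hsplit, List.getElem?_append_right (le_refl _), Nat.sub_self, hr]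
    rfl
  refine ⟨(pvOcc (sl.take p) 0 c).length, ⟨?_, ?_⟩, hat⟩
  · intro j hj
    have hv : (pvOcc (sl.take p) 0 c)[j]? = some ((pvOcc (sl.take p) 0 c)[j]) :=
      List.getElem?_eq_getElem hj
    refine ⟨(pvOcc (sl.take p) 0 c)[j], ?_, ?_⟩
    · rw [hsplit, List.getElem?_append_left hj]; exact hv
    · have hb := (pvOcc_bounds c (sl.take p) 0 j _ hv).2
      rw [htk] at hb
      push_cast at hb ⊢
      omega
  · exact Or.inr ⟨((p + m : Nat) : Int), hat, by push_cast; omega⟩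

-- cursor invariant: everything below a cursor is a position already passed
def pvInv (sl : List Char) (cur : PySem.Dict Char Nat) (p : Nat) : Prop :=
  ∀ c, ∀ j < cur.getD c 0, ∃ v, (pvOcc sl 0 c)[j]? = some v ∧ v < ((p : Nat) : Int)

-- B's fold over t computes pvGreedy on the suffix of s
lemma pvBfold (sl : List Char) : ∀ (ts : List Char) (p : Nat) (acc : List Int) (cur : PySem.Dict Char Nat),
    List.Sublist ts (sl.drop p) → pvInv sl cur p →
    ((ts.foldl
      (fun (st : List Int × PySem.Dict Char Nat × Int) c =>
        let lst := (pvPosBuild sl).getD c []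
        let k := pvSkip lst st.2.2 (st.2.1.getD c 0)
        match lst[k]? with
        | some x => (st.1 ++ [x + 1], st.2.1.insert c (k + 1), x + 1)
        | none => st)
      (acc, cur, ((p : Nat) : Int))).1) = acc ++ pvGreedy (sl.drop p) ts p := by
  intro ts
  induction ts with
  | nil => intro p acc cur _ _; simp [pvGreedy_nil_t]
  | cons c cs ih =>
    intro p acc cur h hinv
    have hc : c ∈ sl.drop p := h.subset (List.mem_cons_self)
    obtain ⟨m, hm⟩ : ∃ m, PySem.List.index? (sl.drop p) c = some m := by
      have := (PySem.List.index?_isSome_iff (xs := sl.drop p) (v := c)).mpr hc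
      exact Option.isSome_iff_exists.mp this
    obtain ⟨k', hstop', hk'⟩ := pvOcc_stop sl c p hm
    have hstop : pvStop (pvOcc sl 0 c) ((p : Nat) : Int) (pvSkip (pvOcc sl 0 c) ((p : Nat) : Int) (cur.getD c 0)) :=
      pvSkip_stop _ _ _ (hinv c)
    have hkeq : pvSkip (pvOcc sl 0 c) ((p : Nat) : Int) (cur.getD c 0) = k' :=
      pvStop_unique hstop hstop'
    have hx1 : ((p + m : Nat) : Int) + 1 = ((p + m + 1 : Nat) : Int) := by push_cast; ring
    have hsub : List.Sublist cs (sl.drop (p + m + 1)) := by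
      have h2 := pvSublist_drop h hm
      rwa [List.drop_drop, ← Nat.add_assoc] at h2
    have hinv' : pvInv sl (cur.insert c (k' + 1)) (p + m + 1) := by
      intro c' j hj
      by_cases hcc : c' = c
      · subst hcc
        rw [PySem.Dict.getD_insert_self] at hj
        rcases Nat.lt_or_ge j k' with hjk | hjk
        · obtain ⟨v, hv, hvp⟩ := (hkeq ▸ hstop).1 j hjk
          exact ⟨v, hv, by push_cast at hvp ⊢; omega⟩
        · have : j = k' := by omega
          subst this
          exact ⟨((p + m : Nat) : Int), hk', by push_cast; omega⟩
      · rw [PySem.Dict.getD_insert_of_ne _ _ _ hcc] at hj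
        obtain ⟨v, hv, hvp⟩ := hinv c' j hj
        exact ⟨v, hv, by push_cast at hvp ⊢; omega⟩
    rw [List.foldl_cons]
    have hstep : (let lst := (pvPosBuild sl).getD c []
        let k := pvSkip lst (acc, cur, ((p : Nat) : Int)).2.2 ((acc, cur, ((p : Nat) : Int)).2.1.getD c 0)
        match lst[k]? with
        | some x => ((acc, cur, ((p : Nat) : Int)).1 ++ [x + 1], (acc, cur, ((p : Nat) : Int)).2.1.insert c (k + 1), x + 1)
        | none => (acc, cur, ((p : Nat) : Int)))
        = (acc ++ [((p + m + 1 : Nat) : Int)], cur.insert c (k' + 1), ((p + m + 1 : Nat) : Int)) := by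
      simp only [pvPosBuild_getD, hkeq, hk', hx1]
    rw [hstep]
    rw [ih (p + m + 1) (acc ++ [((p + m + 1 : Nat) : Int)]) (cur.insert c (k' + 1)) hsub hinv']
    rw [pvGreedy_index cs p hm]
    simp [← Nat.add_assoc]

-- ===== VERDICT (by name: the statement is the Claim_ definition above) =====
theorem find_motif_indices_spec : Claim_equal_find_motif_indices := by
  intro s t _ hpre
  unfold Spec_find_motif_indices find_motif_indices find_motif_indices_alt
  have hA := pvAfold s.toList t.toList 0 [] (by simpa using hpre)
  have hB := pvBfold s.toList t.toList 0 [] PySem.Dict.empty (by simpa using hpre)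
    (by intro c j hj; simp [PySem.Dict.getD_empty] at hj)
  simp only [Nat.cast_zero] at hA hB
  rw [hA, hB]
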